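-- pv_equiv track=rewrite | github.com/florismeyboom/Computer-Science-Assignment- | CSFinal.py | trueduplicates
-- ===== SOURCE A (Python) =====
-- def trueduplicates(data_cleaned):
--     trueDuplicates = []
--     key_indices = {}
--
--     for i, key in enumerate(data_cleaned['modelID']):
--         if key in key_indices:
--             for j in key_indices[key]:
--                 trueDuplicates.append((j, i))
--             key_indices[key].append(i)
--         else:
--             key_indices[key] = [i]
--
--     return trueDuplicates
-- ===== SOURCE B (Python) =====
-- def trueduplicates(data_cleaned):
--     # Same return value as A; no index dict, a plain quadratic double scan
--     # that emits pairs in the same (outer i ascending, inner j < i) order.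
--     keys = list(data_cleaned['modelID'])
--     out = []
--     for i in range(len(keys)):
--         for j in range(i):
--             if keys[j] == keys[i]:
--                 out.append((j, i))
--     return out
-- ===== Notes on version B (the rewrite author's own statement) =====
-- stated objective: simpler
-- what changed: Replaces the dict that groups indices per key with a naive double loop over positions, appending (j, i) whenever an earlier key equals the current one.
import Mathlib
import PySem

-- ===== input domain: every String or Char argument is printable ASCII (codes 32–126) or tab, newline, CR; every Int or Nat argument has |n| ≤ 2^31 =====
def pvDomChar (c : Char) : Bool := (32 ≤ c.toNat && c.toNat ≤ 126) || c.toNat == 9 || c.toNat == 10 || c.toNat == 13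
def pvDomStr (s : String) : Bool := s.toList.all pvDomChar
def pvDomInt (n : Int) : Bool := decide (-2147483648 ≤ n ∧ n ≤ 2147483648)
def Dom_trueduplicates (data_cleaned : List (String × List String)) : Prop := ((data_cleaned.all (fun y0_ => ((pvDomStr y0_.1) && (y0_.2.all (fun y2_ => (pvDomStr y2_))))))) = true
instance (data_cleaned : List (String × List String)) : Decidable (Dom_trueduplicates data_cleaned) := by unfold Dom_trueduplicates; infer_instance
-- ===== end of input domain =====

-- B differs from A only in algorithm; the equivalence is about the return value (neither mutates its argument).

-- ===== PORT A =====
-- the loop body of A: (acc, key_indices) updated by one (i, key) pair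
def tdStep (st : List (Int × Int) × PySem.Dict String (List Int)) (p : Int × String) :
    List (Int × Int) × PySem.Dict String (List Int) :=
  if st.2.contains p.2 then
    (st.1 ++ (st.2.getD p.2 []).map (fun j => (j, p.1)), st.2.insert p.2 (st.2.getD p.2 [] ++ [p.1]))
  else
    (st.1, st.2.insert p.2 [p.1])

def trueduplicates (data_cleaned : List (String × List String)) : List (Int × Int) :=
  match (PySem.Dict.mk data_cleaned).get? "modelID" with
  | none => []      -- Python raises KeyError here; excluded by Pre_
  | some col =>
    ((PySem.List.enumerate col 0).foldl tdStep ([], PySem.Dict.empty)).1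

-- ===== PORT B =====
-- keys[j] == keys[i] is ported as pyGet? equality; both indices are in range, so this is exact
def trueduplicates_alt (data_cleaned : List (String × List String)) : List (Int × Int) :=
  match (PySem.Dict.mk data_cleaned).get? "modelID" with
  | none => []      -- Python raises KeyError here; excluded by Pre_
  | some keys =>
    (PySem.List.pyRange 0 keys.length 1).foldl (fun acc i =>
      (PySem.List.pyRange 0 i 1).foldl (fun acc2 j =>
        if PySem.List.pyGet? keys j == PySem.List.pyGet? keys i then acc2 ++ [(j, i)] else acc2)
        acc) []

-- ===== PRECONDITION & SPEC =====
-- Pre_ excludes only the inputs on which A raises KeyError ('modelID' absent)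
def Pre_trueduplicates (data_cleaned : List (String × List String)) : Prop :=
  "modelID" ∈ data_cleaned.map Prod.fst
instance (data_cleaned : List (String × List String)) : Decidable (Pre_trueduplicates data_cleaned) := by
  unfold Pre_trueduplicates; infer_instance

def pvWitness_trueduplicates : (List (String × List String)) := [("modelID", ["a", "b", "a"])]

def Spec_trueduplicates (data_cleaned : List (String × List String)) (out : List (Int × Int)) : Prop := out = trueduplicates_alt data_cleaned
instance (data_cleaned : List (String × List String)) (out : List (Int × Int)) : Decidable (Spec_trueduplicates data_cleaned out) := by unfold Spec_trueduplicates; infer_instance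

-- ===== CLAIM (what is proved, stated in full; the proofs are below) =====
def Claim_equal_trueduplicates : Prop := ∀ (data_cleaned : List (String × List String)), Dom_trueduplicates data_cleaned → Pre_trueduplicates data_cleaned → Spec_trueduplicates data_cleaned (trueduplicates data_cleaned)

-- ===== LEMMAS AND PROOFS =====

-- indices of key k in xs, in order
def tdOcc (xs : List String) (k : String) : List Int :=
  (PySem.List.pyRange 0 xs.length 1).filter (fun j => PySem.List.pyGet? xs j == some k)

-- the common closed form: all pairs (j, i), j < i, with equal keys, outer i ascending
def tdPairs (xs : List String) : List (Int × Int) :=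
  (PySem.List.pyRange 0 xs.length 1).flatMap (fun i =>
    ((PySem.List.pyRange 0 i 1).filter (fun j => PySem.List.pyGet? xs j == PySem.List.pyGet? xs i)).map
      (fun j => (j, i)))

lemma tdOcc_nil (k : String) : tdOcc [] k = [] := by
  simp [tdOcc, PySem.List.pyRange_one_eq_nil]

lemma pyGet?_append_left_of_mem (xs : List String) (x : String) (j : Int)
    (h0 : 0 ≤ j) (h1 : j < (xs.length : Int)) :
    PySem.List.pyGet? (xs ++ [x]) j = PySem.List.pyGet? xs j := by
  rw [PySem.List.pyGet?_of_nonneg _ h0, PySem.List.pyGet?_of_nonneg _ h0,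
      List.getElem?_append_left (by omega)]

lemma tdOcc_append (xs : List String) (x k : String) :
    tdOcc (xs ++ [x]) k = tdOcc xs k ++ (if x == k then [(xs.length : Int)] else []) := by
  unfold tdOcc
  have hlen : (((xs ++ [x]).length : Nat) : Int) = (xs.length : Int) + 1 := by
    simp
  rw [hlen, PySem.List.pyRange_one_succ_right (by positivity), List.filter_append]
  congr 1
  · apply List.filter_congr
    intro j hj
    rw [PySem.List.mem_pyRange_one] at hj
    rw [pyGet?_append_left_of_mem xs x j hj.1 hj.2]
  · have hx : PySem.List.pyGet? (xs ++ [x]) (xs.length : Int) = some x := by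
      simpa using PySem.List.pyGet?_append_length xs ([] : List String) x
    simp only [List.filter_cons, List.filter_nil, hx]
    by_cases hxk : x = k <;> simp [hxk]

lemma tdOcc_eq_nil_of_not_mem (xs : List String) (k : String) (h : k ∉ xs) :
    tdOcc xs k = [] := by
  unfold tdOcc
  rw [List.filter_eq_nil_iff]
  intro j _ hj
  have hj' : PySem.List.pyGet? xs j = some k := by
    simpa using hj
  exact h (PySem.List.mem_of_pyGet?_eq_some xs hj')

lemma tdPairs_nil : tdPairs [] = [] := by
  simp [tdPairs, PySem.List.pyRange_one_eq_nil]

lemma tdPairs_append (xs : List String) (x : String) :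
    tdPairs (xs ++ [x]) = tdPairs xs ++ (tdOcc xs x).map (fun j => (j, (xs.length : Int))) := by
  unfold tdPairs
  have hlen : (((xs ++ [x]).length : Nat) : Int) = (xs.length : Int) + 1 := by
    simp
  rw [hlen, PySem.List.pyRange_one_succ_right (by positivity), List.flatMap_append]
  congr 1
  · apply List.flatMap_congr
    intro i hi
    rw [PySem.List.mem_pyRange_one] at hi
    rw [pyGet?_append_left_of_mem xs x i hi.1 hi.2]
    congr 1
    apply List.filter_congr
    intro j hj
    rw [PySem.List.mem_pyRange_one] at hj
    rw [pyGet?_append_left_of_mem xs x j hj.1 (by omega)]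
  · have hx : PySem.List.pyGet? (xs ++ [x]) (xs.length : Int) = some x := by
      simpa using PySem.List.pyGet?_append_length xs ([] : List String) x
    simp only [List.flatMap_cons, List.flatMap_nil, List.append_nil, hx]
    unfold tdOcc
    congr 1
    apply List.filter_congr
    intro j hj
    rw [PySem.List.mem_pyRange_one] at hj
    rw [pyGet?_append_left_of_mem xs x j hj.1 (by omega)]

-- A's loop invariant
lemma tdLoop_spec (xs : List String) :
    ((PySem.List.enumerate xs 0).foldl tdStep ([], PySem.Dict.empty)).1 = tdPairs xs ∧
    (∀ k, ((PySem.List.enumerate xs 0).foldl tdStep ([], PySem.Dict.empty)).2.getD k [] = tdOcc xs k) ∧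
    (∀ k, ((PySem.List.enumerate xs 0).foldl tdStep ([], PySem.Dict.empty)).2.contains k = true ↔ k ∈ xs) := by
  induction xs using List.reverseRecOn with
  | nil =>
    refine ⟨by simp [PySem.List.enumerate_nil, tdPairs_nil], ?_, ?_⟩
    · intro k; simp [PySem.List.enumerate_nil, tdOcc_nil]
    · intro k; simp [PySem.List.enumerate_nil]
  | append_singleton xs x ih =>
    obtain ⟨h1, h2, h3⟩ := ih
    have henum : PySem.List.enumerate (xs ++ [x]) 0
        = PySem.List.enumerate xs 0 ++ [((xs.length : Int), x)] := by
      rw [PySem.List.enumerate_append]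
      simp [PySem.List.enumerate_cons, PySem.List.enumerate_nil]
    rw [henum, List.foldl_append, List.foldl_cons, List.foldl_nil]
    set st := (PySem.List.enumerate xs 0).foldl tdStep ([], PySem.Dict.empty) with hst
    by_cases hmem : x ∈ xs
    · have hc : st.2.contains x = true := (h3 x).mpr hmem
      have hstep : tdStep st ((xs.length : Int), x)
          = (st.1 ++ (st.2.getD x []).map (fun j => (j, (xs.length : Int))),
             st.2.insert x (st.2.getD x [] ++ [(xs.length : Int)])) := by
        unfold tdStep; rw [hc]; simp
      rw [hstep]
      refine ⟨?_, ?_, ?_⟩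
      · simp only [h1, h2 x, tdPairs_append]
      · intro k
        by_cases hk : k = x
        · subst hk
          rw [PySem.Dict.getD_insert, if_pos rfl, h2 k, tdOcc_append]
          simp
        · rw [PySem.Dict.getD_insert, if_neg hk, h2 k, tdOcc_append]
          have : (x == k) = false := by simp [Ne.symm hk]
          simp [this]
      · intro k
        rw [PySem.Dict.contains_insert]
        simp only [Bool.or_eq_true, beq_iff_eq, h3 k, List.mem_append,
          List.mem_singleton]
        tauto
    · have hc : st.2.contains x = false := by
        cases hcc : st.2.contains x with
        | false => rfl
        | true => exact absurd ((h3 x).mp hcc) hmem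
      have hstep : tdStep st ((xs.length : Int), x)
          = (st.1, st.2.insert x [(xs.length : Int)]) := by
        unfold tdStep; rw [hc]; simp
      rw [hstep]
      refine ⟨?_, ?_, ?_⟩
      · simp only [h1, tdPairs_append, tdOcc_eq_nil_of_not_mem xs x hmem,
          List.map_nil, List.append_nil]
      · intro k
        by_cases hk : k = x
        · subst hk
          rw [PySem.Dict.getD_insert, if_pos rfl, tdOcc_append,
              tdOcc_eq_nil_of_not_mem xs k hmem]
          simp
        · rw [PySem.Dict.getD_insert, if_neg hk, h2 k, tdOcc_append]
          have : (x == k) = false := by simp [Ne.symm hk]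
          simp [this]
      · intro k
        rw [PySem.Dict.contains_insert]
        simp only [Bool.or_eq_true, beq_iff_eq, h3 k, List.mem_append,
          List.mem_singleton]
        tauto

lemma tdAlt_eq_tdPairs (xs : List String) :
    (PySem.List.pyRange 0 xs.length 1).foldl (fun acc i =>
      (PySem.List.pyRange 0 i 1).foldl (fun acc2 j =>
        if PySem.List.pyGet? xs j == PySem.List.pyGet? xs i then acc2 ++ [(j, i)] else acc2)
        acc) [] = tdPairs xs := by
  simp only [PySem.List.foldl_append_if, PySem.List.foldl_append_eq_flatMap]
  simp [tdPairs]

-- ===== VERDICT (by name: the statement is the Claim_ definition above) =====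
theorem trueduplicates_spec : Claim_equal_trueduplicates := by
  intro d _ _
  unfold Spec_trueduplicates trueduplicates trueduplicates_alt
  cases h : (PySem.Dict.mk d).get? "modelID" with
  | none => rfl
  | some col =>
    dsimp only
    rw [(tdLoop_spec col).1, tdAlt_eq_tdPairs col]
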